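-- pv_equiv track=rewrite | github.com/JarredAllen/discrete-complexity-code | graphs.py | combine_graphs
-- ===== SOURCE A (Python) =====
-- def combine_graphs(g1, g2):
--     c = [[0 for i in range(len(g1)+len(g2))] for j in range(len(g1)+len(g2))]
--     for i in range(len(g1)):
--         for j in range(len(g1)):
--             c[i][j] = g1[i][j]
--     for i in range(len(g2)):
--         for j in range(len(g2)):
--             c[i+len(g1)][j+len(g1)] = g2[i][j]
--     return c
-- ===== SOURCE B (Python) =====
-- def combine_graphs(g1, g2):
--     n1 = len(g1)
--     n = n1 + len(g2)
--
--     def cell(i, j):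
--         if i < n1 and j < n1:
--             return g1[i][j]
--         if i >= n1 and j >= n1:
--             return g2[i - n1][j - n1]
--         return 0
--
--     return [[cell(i, j) for j in range(n)] for i in range(n)]
-- ===== Notes on version B (the rewrite author's own statement) =====
-- stated objective: alternative
-- what changed: B computes every entry once by a closed-form per-cell case formula on its coordinates (g1 block, g2 block, else 0) in a single uniform generation over the full index grid, instead of A's staged approach of preallocating a zero matrix and then overwriting the two diagonal blocks with nested copy loops.
import Mathlib
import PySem

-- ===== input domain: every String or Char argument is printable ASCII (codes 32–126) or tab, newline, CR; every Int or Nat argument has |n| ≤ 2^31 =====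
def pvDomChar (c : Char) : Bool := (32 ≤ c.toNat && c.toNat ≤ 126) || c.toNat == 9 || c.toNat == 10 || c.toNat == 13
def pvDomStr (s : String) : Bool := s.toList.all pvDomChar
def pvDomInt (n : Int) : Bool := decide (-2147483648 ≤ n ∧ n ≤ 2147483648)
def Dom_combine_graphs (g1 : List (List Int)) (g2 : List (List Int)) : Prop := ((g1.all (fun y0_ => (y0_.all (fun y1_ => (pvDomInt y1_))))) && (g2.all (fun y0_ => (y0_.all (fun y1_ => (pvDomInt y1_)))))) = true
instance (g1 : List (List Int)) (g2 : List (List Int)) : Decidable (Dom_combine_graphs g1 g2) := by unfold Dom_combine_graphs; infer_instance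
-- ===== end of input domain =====

-- B computes each entry once by a closed-form per-cell case formula on its coordinates,
-- instead of A's preallocated zero grid overwritten block-by-block.

-- ===== PORT A =====
-- Literal port of A: zero grid, then two nested index loops overwriting cells.
-- Python's c[i][j] / g[i][j] reads and writes are in range on every input admitted by
-- Pre_combine_graphs, so getD/set return exactly the Python element there.
def combine_graphs (g1 : List (List Int)) (g2 : List (List Int)) : List (List Int) :=
  let n := g1.length + g2.length
  let c0 := (List.range n).map (fun _ => (List.range n).map (fun _ => (0 : Int)))
  let c1 := (List.range g1.length).foldl (fun c i =>
      (List.range g1.length).foldl (fun c j =>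
        c.set i ((c.getD i []).set j ((g1.getD i []).getD j 0))) c) c0
  (List.range g2.length).foldl (fun c i =>
      (List.range g2.length).foldl (fun c j =>
        c.set (i + g1.length) ((c.getD (i + g1.length) []).set (j + g1.length) ((g2.getD i []).getD j 0))) c) c1

-- ===== PORT B =====
-- Literal port of B: one uniform generation over the (n1+n2)×(n1+n2) index grid, each
-- cell computed by the case formula (g[i][j] reads ported with getD, in range on every
-- input admitted by Pre_combine_graphs).
def combine_graphs_alt (g1 : List (List Int)) (g2 : List (List Int)) : List (List Int) :=
  let n1 := g1.length
  let n := n1 + g2.length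
  let cell : Nat → Nat → Int := fun i j =>
    if i < n1 ∧ j < n1 then (g1.getD i []).getD j 0
    else if n1 ≤ i ∧ n1 ≤ j then (g2.getD (i - n1) []).getD (j - n1) 0
    else 0
  (List.range n).map (fun i => (List.range n).map (fun j => cell i j))

-- ===== PRECONDITION & SPEC =====
-- Pre_ excludes exactly the inputs on which A raises IndexError: some row of g1
-- shorter than len(g1) or some row of g2 shorter than len(g2).
def Pre_combine_graphs (g1 : List (List Int)) (g2 : List (List Int)) : Prop :=
  (∀ r ∈ g1, g1.length ≤ r.length) ∧ (∀ r ∈ g2, g2.length ≤ r.length)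
instance (g1 : List (List Int)) (g2 : List (List Int)) : Decidable (Pre_combine_graphs g1 g2) := by unfold Pre_combine_graphs; infer_instance
def pvWitness_combine_graphs : List (List Int) × List (List Int) := ([[1, 2], [3, 4]], [[5]])

def Spec_combine_graphs (g1 : List (List Int)) (g2 : List (List Int)) (out : List (List Int)) : Prop := out = combine_graphs_alt g1 g2
instance (g1 : List (List Int)) (g2 : List (List Int)) (out : List (List Int)) : Decidable (Spec_combine_graphs g1 g2 out) := by unfold Spec_combine_graphs; infer_instance

-- ===== CLAIM (what is proved, stated in full; the proofs are below) =====
def Claim_equal_combine_graphs : Prop := ∀ (g1 : List (List Int)) (g2 : List (List Int)), Dom_combine_graphs g1 g2 → Pre_combine_graphs g1 g2 → Spec_combine_graphs g1 g2 (combine_graphs g1 g2)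

-- ===== LEMMAS AND PROOFS =====

-- Proof-only canonical form both ports are reduced to.
def canon_cg (g1 g2 : List (List Int)) : List (List Int) :=
  g1.map (fun r => r.take g1.length ++ List.replicate g2.length (0 : Int)) ++
  g2.map (fun r => List.replicate g1.length (0 : Int) ++ r.take g2.length)

-- Generic loop lemma: folding i over range m, each step replacing the element at
-- position i+k by h i applied to the current element there, rewrites the slice
-- [k, k+m) of c and leaves the rest alone.
theorem foldl_set_offset {α : Type} (d : α) (h : ℕ → α → α) (c : List α) (k m : ℕ)
    (hm : k + m ≤ c.length) :
    (List.range m).foldl (fun c i => c.set (i + k) (h i (c.getD (i + k) d))) c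
      = c.take k ++ (List.range m).map (fun i => h i (c.getD (i + k) d)) ++ c.drop (k + m) := by
  induction m with
  | zero => simp
  | succ m ih =>
    have hm' : k + m ≤ c.length := by omega
    have hlt : k + m < c.length := by omega
    rw [List.range_succ, List.foldl_append, List.foldl_cons, List.foldl_nil, ih hm']
    have hklen : k ≤ c.length := by omega
    have hElen : (c.take k ++ (List.range m).map (fun i => h i (c.getD (i + k) d)) ++ c.drop (k + m)).length = c.length := by
      simp; omega
    have hget : (c.take k ++ (List.range m).map (fun i => h i (c.getD (i + k) d)) ++ c.drop (k + m)).getD (m + k) d = c.getD (m + k) d := by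
      rw [List.getD_eq_getElem _ d (by rw [hElen]; omega),
          List.getD_eq_getElem _ d (by omega)]
      have hmin : min k c.length = k := by omega
      simp only [List.getElem_append, List.length_take, List.length_map, List.length_range,
        List.length_append, hmin, List.getElem_drop]
      split_ifs <;> first | omega | (congr 1; omega)
    rw [hget]
    apply List.ext_getElem (by simp; omega)
    intro n hn1 hn2
    simp only [List.length_set, List.length_append, List.length_take, List.length_map,
      List.length_range, List.length_drop] at hn1 hn2
    rw [List.getElem_set]
    have hmin : min k c.length = k := by omega
    simp only [List.map_append, List.getElem_append, List.length_take, List.length_map,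
      List.length_range, List.length_append, List.map_cons, List.map_nil,
      hmin, List.getElem_drop, List.getElem_map, List.getElem_range,
      List.length_cons, List.length_nil]
    split_ifs <;> first | rfl | omega | (congr 1; omega) | simp

-- Special case k = 0.
theorem foldl_set_offset0 {α : Type} (d : α) (h : ℕ → α → α) (c : List α) (m : ℕ)
    (hm : m ≤ c.length) :
    (List.range m).foldl (fun c i => c.set i (h i (c.getD i d))) c
      = (List.range m).map (fun i => h i (c.getD i d)) ++ c.drop m := by
  have := foldl_set_offset d h c 0 m (by omega)
  simpa using this

-- A loop that only ever rewrites the fixed position i is the single rewrite of that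
-- position by the folded row transformation.
theorem foldl_set_const_idx {α : Type} (d : α) (i : ℕ) (f : ℕ → α → α) (c : List α) (m : ℕ) :
    (List.range m).foldl (fun c j => c.set i (f j (c.getD i d))) c
      = c.set i ((List.range m).foldl (fun r j => f j r) (c.getD i d)) := by
  by_cases hi : i < c.length
  · induction m with
    | zero =>
      simp only [List.range_zero, List.foldl_nil]
      rw [List.getD_eq_getElem _ d hi, List.set_getElem_self]
    | succ m ih =>
      rw [List.range_succ, List.foldl_append, List.foldl_cons, List.foldl_nil, ih,
        List.foldl_append, List.foldl_cons, List.foldl_nil]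
      have hset : ∀ x : α, (c.set i x).getD i d = x := by
        intro x
        rw [List.getD_eq_getElem _ d (by simpa using hi), List.getElem_set_self]
      rw [hset, List.set_set]
  · have hset : ∀ x : α, c.set i x = c := fun x => List.set_eq_of_length_le (by omega)
    have hfold : ∀ m, (List.range m).foldl (fun c j => c.set i (f j (c.getD i d))) c = c := by
      intro m
      induction m with
      | zero => simp
      | succ m ih => rw [List.range_succ, List.foldl_append, List.foldl_cons, List.foldl_nil, ih, hset]
    rw [hfold, hset]

-- range-indexed map over getD is take.
theorem map_range_getD_take (l : List Int) (m : ℕ) (hm : m ≤ l.length) :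
    (List.range m).map (fun j => l.getD j 0) = l.take m := by
  apply List.ext_getElem (by simp; omega)
  intro n hn1 hn2
  simp only [List.getElem_map, List.getElem_range, List.getElem_take]
  rw [List.getD_eq_getElem _ 0 (by simp at hn1; omega)]

-- range-indexed map over getD is map.
theorem map_range_getD {β : Type} (l : List (List Int)) (F : List Int → β) :
    (List.range l.length).map (fun i => F (l.getD i [])) = l.map F := by
  apply List.ext_getElem (by simp)
  intro n hn1 hn2
  simp only [List.getElem_map, List.getElem_range]
  rw [List.getD_eq_getElem _ [] (by simpa using hn1)]

theorem A_eq_canon (g1 g2 : List (List Int))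
    (h1 : ∀ r ∈ g1, g1.length ≤ r.length) (h2 : ∀ r ∈ g2, g2.length ≤ r.length) :
    combine_graphs g1 g2 = canon_cg g1 g2 := by
  unfold combine_graphs canon_cg
  simp only [List.map_const', List.length_range]
  set n1 := g1.length with hn1
  set n2 := g2.length with hn2
  set zrow : List Int := List.replicate (n1 + n2) 0 with hzrow
  set c0 : List (List Int) := List.replicate (n1 + n2) zrow with hc0
  have hin1 : (List.range n1).foldl (fun c i =>
        (List.range n1).foldl (fun c j => c.set i ((c.getD i []).set j ((g1.getD i []).getD j 0))) c) c0
      = (List.range n1).foldl (fun c i =>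
        c.set i ((List.range n1).foldl (fun r j => r.set j ((g1.getD i []).getD j 0)) (c.getD i []))) c0 :=
    PySem.List.foldl_congr_mem _ _ _ _ (fun c i _ =>
      foldl_set_const_idx [] i (fun j r => r.set j ((g1.getD i []).getD j 0)) c n1)
  rw [hin1]
  rw [foldl_set_offset0 ([] : List Int)
    (fun i row => (List.range n1).foldl (fun r j => r.set j ((g1.getD i []).getD j 0)) row)
    c0 n1 (by simp [hc0])]
  have hrow1 : ∀ i ∈ List.range n1,
      (List.range n1).foldl (fun r j => r.set j ((g1.getD i []).getD j 0)) (c0.getD i [])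
        = (g1.getD i []).take n1 ++ List.replicate n2 0 := by
    intro i hi
    rw [List.mem_range] at hi
    have hc0i : c0.getD i [] = zrow := List.getD_replicate _ (by omega)
    rw [hc0i]
    have hlen : n1 ≤ (g1.getD i []).length := by
      have : g1.getD i [] ∈ g1 := by
        rw [List.getD_eq_getElem _ [] (by omega)]
        exact List.getElem_mem _
      exact h1 _ this
    have := foldl_set_offset0 (0 : Int) (fun j _ => (g1.getD i []).getD j 0) zrow n1 (by simp [hzrow])
    simp only at this
    rw [this, map_range_getD_take _ _ hlen, hzrow, List.drop_replicate]
    congr 2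
    omega
  rw [List.map_congr_left hrow1]
  set M1 : List (List Int) := (List.range n1).map (fun i => (g1.getD i []).take n1 ++ List.replicate n2 0) with hM1
  have hc0drop : c0.drop n1 = List.replicate n2 zrow := by
    rw [hc0, List.drop_replicate]; congr 1; omega
  rw [hc0drop]
  set c1 : List (List Int) := M1 ++ List.replicate n2 zrow with hc1
  have hin2 : (List.range n2).foldl (fun c i =>
        (List.range n2).foldl (fun c j => c.set (i + n1) ((c.getD (i + n1) []).set (j + n1) ((g2.getD i []).getD j 0))) c) c1
      = (List.range n2).foldl (fun c i =>
        c.set (i + n1) ((List.range n2).foldl (fun r j => r.set (j + n1) ((g2.getD i []).getD j 0)) (c.getD (i + n1) []))) c1 :=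
    PySem.List.foldl_congr_mem _ _ _ _ (fun c i _ =>
      foldl_set_const_idx [] (i + n1) (fun j r => r.set (j + n1) ((g2.getD i []).getD j 0)) c n2)
  rw [hin2]
  have hc1len : c1.length = n1 + n2 := by simp [hc1, hM1]
  rw [foldl_set_offset ([] : List Int)
    (fun i row => (List.range n2).foldl (fun r j => r.set (j + n1) ((g2.getD i []).getD j 0)) row)
    c1 n1 n2 (by omega)]
  have hrow2 : ∀ i ∈ List.range n2,
      (List.range n2).foldl (fun r j => r.set (j + n1) ((g2.getD i []).getD j 0)) (c1.getD (i + n1) [])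
        = List.replicate n1 0 ++ (g2.getD i []).take n2 := by
    intro i hi
    rw [List.mem_range] at hi
    have hc1i : c1.getD (i + n1) [] = zrow := by
      rw [hc1, List.getD_eq_getElem?_getD,
        List.getElem?_append_right (by simp [hM1])]
      have hidx : i + n1 - M1.length = i := by simp [hM1]
      rw [hidx, List.getElem?_replicate]
      simp [hi]
    rw [hc1i]
    have hlen : n2 ≤ (g2.getD i []).length := by
      have : g2.getD i [] ∈ g2 := by
        rw [List.getD_eq_getElem _ [] (by omega)]
        exact List.getElem_mem _
      exact h2 _ this
    have := foldl_set_offset (0 : Int) (fun j _ => (g2.getD i []).getD j 0) zrow n1 n2 (by simp [hzrow])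
    simp only at this
    rw [this, map_range_getD_take _ _ hlen, hzrow, List.take_replicate, List.drop_replicate]
    have h1' : min n1 (n1 + n2) = n1 := by omega
    have h2' : n1 + n2 - (n1 + n2) = 0 := by omega
    rw [h1', h2', List.replicate_zero, List.append_nil]
  rw [List.map_congr_left hrow2]
  have htake : c1.take n1 = M1 := List.take_left' (by simp [hM1])
  have hdrop : c1.drop (n1 + n2) = [] := List.drop_eq_nil_of_le (by omega)
  rw [htake, hdrop, List.append_nil]
  congr 1
  · rw [hM1]
    exact map_range_getD g1 (fun r => r.take g1.length ++ List.replicate g2.length 0)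
  · exact map_range_getD g2 (fun r => List.replicate g1.length 0 ++ r.take g2.length)

theorem B_eq_canon (g1 g2 : List (List Int))
    (h1 : ∀ r ∈ g1, g1.length ≤ r.length) (h2 : ∀ r ∈ g2, g2.length ≤ r.length) :
    combine_graphs_alt g1 g2 = canon_cg g1 g2 := by
  have halt : combine_graphs_alt g1 g2
      = (List.range (g1.length + g2.length)).map (fun i =>
          (List.range (g1.length + g2.length)).map (fun j =>
            if i < g1.length ∧ j < g1.length then (g1.getD i []).getD j 0
            else if g1.length ≤ i ∧ g1.length ≤ j then (g2.getD (i - g1.length) []).getD (j - g1.length) 0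
            else 0)) := rfl
  rw [halt]
  unfold canon_cg
  apply List.ext_getElem (by simp)
  intro i hi1 hi2
  simp only [List.length_map, List.length_range] at hi1
  simp only [List.getElem_map, List.getElem_range]
  by_cases hi : i < g1.length
  · have hri : g1.length ≤ g1[i].length := h1 g1[i] (List.getElem_mem _)
    rw [List.getElem_append_left (by simpa using hi), List.getElem_map]
    apply List.ext_getElem (by simp; omega)
    intro j hj1 hj2
    simp only [List.length_map, List.length_range] at hj1
    simp only [List.getElem_map, List.getElem_range]
    rw [List.getD_eq_getElem _ [] (by omega)]
    by_cases hj : j < g1.length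
    · rw [if_pos ⟨hi, hj⟩, List.getElem_append_left (by simp; omega), List.getElem_take,
        List.getD_eq_getElem _ 0 (by omega)]
    · rw [if_neg (by omega), if_neg (by omega),
        List.getElem_append_right (by simp; omega), List.getElem_replicate]
  · have hri : g2.length ≤ g2[i - g1.length].length := h2 _ (List.getElem_mem (by omega))
    rw [List.getElem_append_right (by simpa using hi), List.getElem_map]
    apply List.ext_getElem (by
      simp only [List.length_map, List.length_range, List.length_append,
        List.length_replicate, List.length_take]
      omega)
    intro j hj1 hj2
    simp only [List.length_map, List.length_range] at hj1
    simp only [List.getElem_map, List.getElem_range]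
    by_cases hj : j < g1.length
    · rw [if_neg (by omega), if_neg (by omega),
        List.getElem_append_left (by simp; omega), List.getElem_replicate]
    · rw [if_neg (by omega), if_pos ⟨by omega, by omega⟩,
        List.getD_eq_getElem _ [] (by omega),
        List.getElem_append_right (by simp; omega), List.getElem_take,
        List.getD_eq_getElem _ 0 (by omega)]
      congr 2
      · simp
      · simp

-- ===== VERDICT (by name: the statement is the Claim_ definition above) =====
theorem combine_graphs_spec : Claim_equal_combine_graphs := by
  intro g1 g2 _ hpre
  unfold Spec_combine_graphs
  rw [A_eq_canon g1 g2 hpre.1 hpre.2, B_eq_canon g1 g2 hpre.1 hpre.2]
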